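-- pv_equiv track=rewrite | github.com/bigbanonos/bigbanonos-hugo | nuclear_letters.py | looks_like_concat
-- ===== SOURCE A (Python) =====
-- def looks_like_concat(slug, all_canon_slugs):
--     """Heuristic: is this slug a featured-artist concat that should be deleted?
--     True if: 4+ hyphen-separated parts, AND another canonical artist slug
--     is a prefix, AND the remainder is also multi-word (looks like another name).
--     """
--     parts = slug.split("-")
--     if len(parts) < 4:
--         return False
--     for canon in all_canon_slugs:
--         if slug.startswith(canon + "-") and slug != canon:
--             tail = slug[len(canon) + 1:]
--             tail_parts = tail.split("-")
--             if len(tail_parts) >= 2: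
--                 return True
--     return False
-- ===== SOURCE B (Python) =====
-- def looks_like_concat(slug, all_canon_slugs):
--     """Same predicate, but enumerates the slug's own hyphen-boundary prefixes
--     and tests each against a set built once from all_canon_slugs."""
--     parts = slug.split("-")
--     if len(parts) < 4:
--         return False
--     canon_set = set(all_canon_slugs)
--     for j in range(1, len(parts) - 1):
--         if "-".join(parts[:j]) in canon_set:
--             return True
--     return False
-- ===== Notes on version B (the rewrite author's own statement) =====
-- stated objective: alternative
-- what changed: Instead of scanning every canonical slug and testing it as a prefix of the slug, B builds a set of canonical slugs once and enumerates the slug's own hyphen-boundary prefixes (keeping at least a 2-part tail), looking each up in the set.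
import Mathlib
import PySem

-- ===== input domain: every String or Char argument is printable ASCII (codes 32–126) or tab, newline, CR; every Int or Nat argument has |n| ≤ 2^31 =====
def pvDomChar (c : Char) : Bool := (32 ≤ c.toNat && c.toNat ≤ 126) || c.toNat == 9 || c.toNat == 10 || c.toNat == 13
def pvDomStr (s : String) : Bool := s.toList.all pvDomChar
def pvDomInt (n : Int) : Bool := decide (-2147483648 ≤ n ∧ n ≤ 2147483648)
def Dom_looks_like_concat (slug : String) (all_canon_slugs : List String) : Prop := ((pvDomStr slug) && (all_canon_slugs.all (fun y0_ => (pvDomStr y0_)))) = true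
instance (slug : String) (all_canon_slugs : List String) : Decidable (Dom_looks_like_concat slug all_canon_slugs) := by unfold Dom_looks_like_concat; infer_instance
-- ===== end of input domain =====

-- B replaces A's scan over every canonical slug by enumerating the slug's own
-- hyphen-boundary prefixes and looking each up in a set built once (alternative decomposition).
-- Python str values are carried as List Char (Python string equality = code-point list equality, exact).

-- ===== PORT A =====
-- the 'for canon in all_canon_slugs' loop of A
def pvLoopA (slug : List Char) : List (List Char) → Bool
  | [] => false
  | canon :: rest =>
    if PySem.Chars.startswith slug (canon ++ ['-']) && !(slug == canon) then
      -- tail = slug[len(canon) + 1:]; tail_parts = tail.split("-")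
      (if 2 ≤ (PySem.Chars.splitOn (PySem.List.slice slug (some ((canon.length : Int) + 1)) none) ['-']).length
       then true
       else pvLoopA slug rest)
    else pvLoopA slug rest

def looks_like_concat (slug : String) (all_canon_slugs : List String) : Bool :=
  let parts := PySem.Chars.splitOn slug.toList ['-']
  if parts.length < 4 then false
  else pvLoopA slug.toList (all_canon_slugs.map String.toList)

-- ===== PORT B =====
-- the 'for j in range(1, len(parts) - 1)' loop of B
def pvLoopB (parts : List (List Char)) (canonSet : PySem.Set (List Char)) : List Int → Bool
  | [] => false
  | j :: rest =>
    if canonSet.contains (PySem.Chars.join ['-'] (PySem.List.slice parts none (some j))) then true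
    else pvLoopB parts canonSet rest

def looks_like_concat_alt (slug : String) (all_canon_slugs : List String) : Bool :=
  let parts := PySem.Chars.splitOn slug.toList ['-']
  if parts.length < 4 then false
  else
    let canonSet := PySem.Set.ofList (all_canon_slugs.map String.toList)
    pvLoopB parts canonSet (PySem.List.pyRange 1 ((parts.length : Int) - 1) 1)

-- ===== PRECONDITION & SPEC =====
def Spec_looks_like_concat (slug : String) (all_canon_slugs : List String) (out : Bool) : Prop := out = looks_like_concat_alt slug all_canon_slugs
instance (slug : String) (all_canon_slugs : List String) (out : Bool) : Decidable (Spec_looks_like_concat slug all_canon_slugs out) := by unfold Spec_looks_like_concat; infer_instance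

-- ===== CLAIM (what is proved, stated in full; the proofs are below) =====
def Claim_equal_looks_like_concat : Prop := ∀ (slug : String) (all_canon_slugs : List String), Dom_looks_like_concat slug all_canon_slugs → Spec_looks_like_concat slug all_canon_slugs (looks_like_concat slug all_canon_slugs)

-- ===== LEMMAS AND PROOFS =====

def pvSplit : List Char → List (List Char)
  | [] => [[]]
  | c :: rest => if c = '-' then [] :: pvSplit rest else (pvSplit rest).modifyHead (c :: ·)
def pvApply (pre : List Char) : List (List Char) → List (List Char)
  | [] => [pre]
  | h :: t => (pre ++ h) :: t

theorem pvSplit_ne_nil (xs : List Char) : pvSplit xs ≠ [] := by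
  induction xs with
  | nil => simp [pvSplit]
  | cons c rest ih =>
    simp only [pvSplit]
    split_ifs
    · simp
    · cases h : pvSplit rest with
      | nil => exact absurd h ih
      | cons a t => simp [List.modifyHead]

theorem pvApply_nil_of_ne (l : List (List Char)) (h : l ≠ []) : pvApply [] l = l := by
  cases l with
  | nil => exact absurd rfl h
  | cons a t => simp [pvApply]

theorem pvGo_spec (l : List Char) (fuel : Nat) (cur : List Char) (acc : List (List Char))
    (h : l.length ≤ fuel) :
    PySem.Chars.splitOn.go ['-'] fuel l cur acc = acc.reverse ++ pvApply cur.reverse (pvSplit l) := by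
  induction fuel generalizing l cur acc with
  | zero =>
    have : l = [] := by cases l <;> simp_all
    subst this
    simp [PySem.Chars.splitOn.go, pvSplit, pvApply]
  | succ f ih =>
    cases l with
    | nil => simp [PySem.Chars.splitOn.go, pvSplit, pvApply]
    | cons c rest =>
      simp only [PySem.Chars.splitOn.go]
      by_cases hc : c = '-'
      · rw [if_pos (by simp [List.isPrefixOf, hc])]
        simp only [List.length_cons] at h
        rw [ih _ _ _ (by simpa using Nat.le_of_succ_le_succ h)]
        simp only [List.reverse_nil, pvApply_nil_of_ne _ (pvSplit_ne_nil _)]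
        simp [pvSplit, hc, pvApply]
      · rw [if_neg (by simp [List.isPrefixOf]; exact fun a => absurd a.symm hc)]
        simp only [List.length_cons] at h
        rw [ih _ _ _ (Nat.le_of_succ_le_succ h)]
        simp only [pvSplit, if_neg hc]
        cases hs : pvSplit rest with
        | nil => exact absurd hs (pvSplit_ne_nil _)
        | cons a t => simp [pvApply, List.modifyHead]

theorem splitOn_eq_pvSplit (xs : List Char) : PySem.Chars.splitOn xs ['-'] = pvSplit xs := by
  rw [PySem.Chars.splitOn, pvGo_spec _ _ _ _ (Nat.le_succ _)]
  simp [pvApply_nil_of_ne _ (pvSplit_ne_nil _)]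

theorem pvSplit_append (xs ys : List Char) :
    pvSplit (xs ++ '-' :: ys) = pvSplit xs ++ pvSplit ys := by
  induction xs with
  | nil => simp [pvSplit]
  | cons c rest ih =>
    simp only [List.cons_append, pvSplit, ih]
    split_ifs
    · simp
    · cases hs : pvSplit rest with
      | nil => exact absurd hs (pvSplit_ne_nil _)
      | cons a t => simp [List.modifyHead]

theorem join_pvSplit (xs : List Char) : PySem.Chars.join ['-'] (pvSplit xs) = xs := by
  induction xs with
  | nil => simp [pvSplit, PySem.Chars.join_singleton]
  | cons c rest ih =>
    simp only [pvSplit]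
    cases hs : pvSplit rest with
    | nil => exact absurd hs (pvSplit_ne_nil _)
    | cons a t =>
      rw [hs] at ih
      split_ifs with hc
      · rw [PySem.Chars.join_cons_cons, ih, hc]; simp
      · cases t with
        | nil => simp_all [List.modifyHead, PySem.Chars.join_singleton]
        | cons b t' =>
          simp only [List.modifyHead, PySem.Chars.join_cons_cons] at *
          simp [ih]

theorem pvSplit_no_sep (xs : List Char) : ∀ p ∈ pvSplit xs, '-' ∉ p := by
  induction xs with
  | nil => simp [pvSplit]
  | cons c rest ih =>
    simp only [pvSplit]
    split_ifs with hc
    · intro p hp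
      rcases List.mem_cons.mp hp with h | h
      · simp [h]
      · exact ih p h
    · cases hs : pvSplit rest with
      | nil => exact absurd hs (pvSplit_ne_nil _)
      | cons a t =>
        intro p hp
        rw [hs] at ih
        rcases List.mem_cons.mp (by simpa [List.modifyHead] using hp) with h | h
        · subst h
          intro hm
          rcases List.mem_cons.mp hm with h' | h'
          · exact hc h'.symm
          · exact ih a (by simp) h'
        · exact ih p (by simp [h])

theorem pvSplit_of_no_sep (p : List Char) (h : '-' ∉ p) : pvSplit p = [p] := by
  induction p with
  | nil => simp [pvSplit]
  | cons c rest ih =>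
    simp only [pvSplit]
    rw [if_neg (by intro hc; exact h (by simp [hc]))]
    rw [ih (fun hm => h (by simp [hm]))]
    simp [List.modifyHead]

theorem pvSplit_join (l : List (List Char)) (hne : l ≠ []) (h : ∀ p ∈ l, '-' ∉ p) :
    pvSplit (PySem.Chars.join ['-'] l) = l := by
  induction l with
  | nil => exact absurd rfl hne
  | cons p rest ih =>
    cases rest with
    | nil => rw [PySem.Chars.join_singleton]; exact pvSplit_of_no_sep p (h p (by simp))
    | cons q r =>
      rw [PySem.Chars.join_cons_cons]
      rw [show p ++ ['-'] ++ PySem.Chars.join ['-'] (q :: r) = p ++ '-' :: PySem.Chars.join ['-'] (q :: r) by simp]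
      rw [pvSplit_append, pvSplit_of_no_sep p (h p (by simp)), ih (by simp) (fun x hx => h x (by simp [hx]))]
      simp

theorem pvJoin_append (a b : List (List Char)) (ha : a ≠ []) (hb : b ≠ []) :
    PySem.Chars.join ['-'] (a ++ b) = PySem.Chars.join ['-'] a ++ '-' :: PySem.Chars.join ['-'] b := by
  induction a with
  | nil => exact absurd rfl ha
  | cons p rest ih =>
    cases rest with
    | nil =>
      cases b with
      | nil => exact absurd rfl hb
      | cons q r =>
        simp only [List.singleton_append, PySem.Chars.join_cons_cons, PySem.Chars.join_singleton]
        simp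
    | cons q r =>
      simp only [List.cons_append, PySem.Chars.join_cons_cons]
      rw [show (q :: r) ++ b = (q :: r) ++ b from rfl] at ih
      have := ih (by simp)
      simp only [List.cons_append] at this
      rw [this]
      simp

theorem pvKey (slug canon : List Char) :
    (PySem.Chars.startswith slug (canon ++ ['-']) = true ∧ ¬ slug = canon ∧
      2 ≤ (PySem.Chars.splitOn (PySem.List.slice slug (some ((canon.length : Int) + 1)) none) ['-']).length)
    ↔ ∃ j : Nat, 1 ≤ j ∧ j + 2 ≤ (pvSplit slug).length ∧
        canon = PySem.Chars.join ['-'] ((pvSplit slug).take j) := by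
  constructor
  · rintro ⟨hsw, -, hlen⟩
    obtain ⟨u, hu⟩ := (PySem.Chars.startswith_iff _ _).mp hsw
    -- slug = canon ++ '-' :: u
    have hslug : slug = canon ++ '-' :: u := by
      rw [← hu]; simp
    have htn : (((canon.length : Int)) + 1).toNat = canon.length + 1 := by omega
    have hdrop : PySem.List.slice slug (some ((canon.length : Int) + 1)) none = u := by
      rw [PySem.List.slice_from _ (by positivity), htn, hslug,
        show canon ++ '-' :: u = (canon ++ ['-']) ++ u by simp,
        show canon.length + 1 = (canon ++ ['-']).length by simp]
      exact List.drop_left ..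
    rw [hdrop, splitOn_eq_pvSplit] at hlen
    refine ⟨(pvSplit canon).length, ?_, ?_, ?_⟩
    · have := pvSplit_ne_nil canon
      cases h : pvSplit canon with
      | nil => exact absurd h this
      | cons a t => simp
    · rw [hslug, pvSplit_append]
      simp; omega
    · rw [hslug, pvSplit_append, List.take_left, join_pvSplit]
  · rintro ⟨j, hj1, hj2, hcanon⟩
    set parts := pvSplit slug with hparts
    have hpre : parts.take j ≠ [] := by
      intro h
      rcases List.take_eq_nil_iff.mp h with h' | h'
      · exact absurd h' (by omega)
      · exact absurd h' (pvSplit_ne_nil slug)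
    have hsuf : parts.drop j ≠ [] := by
      intro h
      have := List.drop_eq_nil_iff.mp h
      omega
    have hslug : slug = canon ++ '-' :: PySem.Chars.join ['-'] (parts.drop j) := by
      conv_lhs => rw [← join_pvSplit slug, ← hparts, ← List.take_append_drop j parts]
      rw [pvJoin_append _ _ hpre hsuf, hcanon]
    have hcanlen : canon.length = (PySem.Chars.join ['-'] (parts.take j)).length := by rw [hcanon]
    refine ⟨?_, ?_, ?_⟩
    · rw [PySem.Chars.startswith_iff, hslug]
      exact ⟨PySem.Chars.join ['-'] (parts.drop j), by simp⟩
    · intro h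
      have := congrArg List.length (hslug ▸ h)
      simp at this
    · have hdrop : PySem.List.slice slug (some ((canon.length : Int) + 1)) none
          = PySem.Chars.join ['-'] (parts.drop j) := by
        have htn : (((canon.length : Int)) + 1).toNat = canon.length + 1 := by omega
        rw [PySem.List.slice_from _ (by positivity), htn, hslug,
          show canon ++ '-' :: PySem.Chars.join ['-'] (parts.drop j)
              = (canon ++ ['-']) ++ PySem.Chars.join ['-'] (parts.drop j) by simp,
          show canon.length + 1 = (canon ++ ['-']).length by simp]
        exact List.drop_left ..
      rw [hdrop, splitOn_eq_pvSplit, pvSplit_join _ hsuf]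
      · have hlt : (parts.drop j).length = parts.length - j := by simp
        omega
      · intro p hp
        exact pvSplit_no_sep slug p (List.mem_of_mem_drop hp)

theorem pvLoopA_iff (slug : List Char) (L : List (List Char)) :
    pvLoopA slug L = true ↔ ∃ canon ∈ L,
      PySem.Chars.startswith slug (canon ++ ['-']) = true ∧ ¬ slug = canon ∧
      2 ≤ (PySem.Chars.splitOn (PySem.List.slice slug (some ((canon.length : Int) + 1)) none) ['-']).length := by
  induction L with
  | nil => simp [pvLoopA]
  | cons canon rest ih =>
    simp only [pvLoopA]
    split_ifs with h1 h2
    · simp only [Bool.and_eq_true, Bool.not_eq_true', beq_eq_false_iff_ne] at h1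
      simp only [true_iff]
      exact ⟨canon, by simp, h1.1, h1.2, h2⟩
    · rw [ih]
      constructor
      · rintro ⟨c, hc, h⟩; exact ⟨c, by simp [hc], h⟩
      · rintro ⟨c, hc, h⟩
        rcases List.mem_cons.mp hc with rfl | hc'
        · exact absurd h.2.2 h2
        · exact ⟨c, hc', h⟩
    · rw [ih]
      simp only [Bool.and_eq_true, Bool.not_eq_true', beq_eq_false_iff_ne, not_and_or] at h1
      constructor
      · rintro ⟨c, hc, h⟩; exact ⟨c, by simp [hc], h⟩
      · rintro ⟨c, hc, h⟩
        rcases List.mem_cons.mp hc with rfl | hc'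
        · rcases h1 with h1 | h1
          · exact absurd h.1 h1
          · exact absurd h.2.1 h1
        · exact ⟨c, hc', h⟩

theorem pvLoopB_iff (parts : List (List Char)) (cs : PySem.Set (List Char)) (js : List Int) :
    pvLoopB parts cs js = true ↔ ∃ j ∈ js,
      cs.contains (PySem.Chars.join ['-'] (PySem.List.slice parts none (some j))) = true := by
  induction js with
  | nil => simp [pvLoopB]
  | cons j rest ih =>
    simp only [pvLoopB]
    split_ifs with h1
    · simp only [true_iff]
      exact ⟨j, by simp, h1⟩
    · rw [ih]
      constructor
      · rintro ⟨x, hx, h⟩; exact ⟨x, by simp [hx], h⟩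
      · rintro ⟨x, hx, h⟩
        rcases List.mem_cons.mp hx with rfl | hx'
        · exact absurd h h1
        · exact ⟨x, hx', h⟩

-- ===== VERDICT (by name: the statement is the Claim_ definition above) =====
theorem looks_like_concat_spec : Claim_equal_looks_like_concat := by
  intro slug all_canon_slugs _
  unfold Spec_looks_like_concat
  simp only [looks_like_concat, looks_like_concat_alt, splitOn_eq_pvSplit]
  by_cases h4 : (pvSplit slug.toList).length < 4
  · simp [h4]
  · rw [if_neg h4, if_neg h4]
    rw [Bool.eq_iff_iff, pvLoopA_iff, pvLoopB_iff]
    constructor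
    · rintro ⟨canon, hc, hcond⟩
      obtain ⟨j, hj1, hj2, hcanon⟩ := (pvKey slug.toList canon).mp hcond
      refine ⟨(j : Int), ?_, ?_⟩
      · rw [PySem.List.mem_pyRange_one]
        refine ⟨by exact_mod_cast hj1, by omega⟩
      · rw [PySem.Set.contains_iff, PySem.Set.mem_ofList,
          PySem.List.slice_to _ (by positivity), Int.toNat_natCast, ← hcanon]
        exact hc
    · rintro ⟨j, hj, hcont⟩
      rw [PySem.List.mem_pyRange_one] at hj
      rw [PySem.Set.contains_iff, PySem.Set.mem_ofList,
        PySem.List.slice_to _ (by omega)] at hcont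
      refine ⟨_, hcont, (pvKey slug.toList _).mpr ⟨j.toNat, by omega, by omega, rfl⟩⟩
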